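-- pv_equiv track=rewrite | github.com/samueljamesbader/compyct | src/compyct/backends/spectre_mcw.py | chunk_keys
-- ===== SOURCE A (Python) =====
-- def chunk_keys(d:dict, by_first_n_char: int, max_in_chunk: int)->list[dict]:
--     """Chunk a dict into a list of dicts, each with at most max_in_chunk items,
--     grouped by the first by_first_n_char characters of the keys.
--     """
--     chunks=[]
--     current_chunk={}
--     current_prefix=None
--     for k in sorted(d.keys()):
--         prefix=k[:by_first_n_char]
--         if (current_prefix is None) or (prefix!=current_prefix) or (len(current_chunk)>=max_in_chunk):
--             if current_chunk:
--                 chunks.append(current_chunk)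
--             current_chunk={k:d[k]}
--             current_prefix=prefix
--         else:
--             current_chunk[k]=d[k]
--     if current_chunk:
--         chunks.append(current_chunk)
--     return chunks
-- ===== SOURCE B (Python) =====
-- def chunk_keys(d: dict, by_first_n_char: int, max_in_chunk: int) -> list[dict]:
--     """Chunk a dict into a list of dicts, each with at most max_in_chunk items,
--     grouped by the first by_first_n_char characters of the keys.
--
--     Two-pointer approach: for each chunk, scan ahead to find its extent
--     (same prefix, at most max(max_in_chunk, 1) keys), then slice it off.
--     """
--     s = max(max_in_chunk, 1)
--     ks = sorted(d)
--     out = []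
--     i = 0
--     while i < len(ks):
--         p = ks[i][:by_first_n_char]
--         t = 1
--         for x in ks[i + 1:i + s]:
--             if x[:by_first_n_char] != p:
--                 break
--             t += 1
--         out.append({k: d[k] for k in ks[i:i + t]})
--         i += t
--     return out
-- ===== Notes on version B (the rewrite author's own statement) =====
-- stated objective: alternative
-- what changed: A's single fused loop that mutates a current chunk/current prefix and flushes on a break condition is replaced by a two-pointer scan: for each chunk, B computes its extent up front (same prefix as the head key, at most max(max_in_chunk,1) keys) and slices that chunk off the sorted key list.
import Mathlib
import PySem

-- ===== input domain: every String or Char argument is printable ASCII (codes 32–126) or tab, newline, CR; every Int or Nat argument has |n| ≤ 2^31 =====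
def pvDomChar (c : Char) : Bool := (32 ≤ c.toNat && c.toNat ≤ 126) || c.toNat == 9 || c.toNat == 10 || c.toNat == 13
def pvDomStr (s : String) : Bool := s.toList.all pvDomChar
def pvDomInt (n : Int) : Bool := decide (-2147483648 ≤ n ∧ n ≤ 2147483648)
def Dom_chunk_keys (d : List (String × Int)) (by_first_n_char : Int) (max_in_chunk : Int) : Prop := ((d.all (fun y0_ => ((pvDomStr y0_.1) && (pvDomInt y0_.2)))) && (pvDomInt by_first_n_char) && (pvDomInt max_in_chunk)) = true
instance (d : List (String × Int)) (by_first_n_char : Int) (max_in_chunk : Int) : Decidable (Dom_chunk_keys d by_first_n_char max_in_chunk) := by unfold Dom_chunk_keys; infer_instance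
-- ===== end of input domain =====

-- B replaces A's fused accumulate-and-break loop (mutable current chunk + current prefix) by a
-- two-pointer scan that computes each chunk's extent up front and slices it off (objective: alternative).

-- k[:by_first_n_char]  (shared by both ports)
def pvPrefix (n : Int) (k : String) : String := PySem.Str.slice k none (some n)

-- ===== PORT A =====
-- the loop body of A; state = (chunks, current_chunk, current_prefix).
-- A finished chunk dict is stored as its items list (the output representation).
-- d[k] is ported as getD dd k 0: k always comes from dd.keys, so the lookup never fails.
def pvStepA (dd : PySem.Dict String Int) (n m : Int)
    (st : List (List (String × Int)) × PySem.Dict String Int × Option String) (k : String) :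
    List (List (String × Int)) × PySem.Dict String Int × Option String :=
  let p := pvPrefix n k
  if st.2.2 = none ∨ some p ≠ st.2.2 ∨ (st.2.1.size : Int) ≥ m then
    ((if st.2.1.items = [] then st.1 else st.1 ++ [st.2.1.items]),
     PySem.Dict.ofList [(k, dd.getD k 0)], some p)
  else
    (st.1, st.2.1.insert k (dd.getD k 0), st.2.2)

def chunk_keys (d : List (String × Int)) (by_first_n_char : Int) (max_in_chunk : Int) : List (List (String × Int)) :=
  let dd := PySem.Dict.ofList d
  let fin := (PySem.List.sorted dd.keys (fun k => k) false).foldl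
    (pvStepA dd by_first_n_char max_in_chunk) ([], PySem.Dict.empty, none)
  if fin.2.1.items = [] then fin.1 else fin.1 ++ [fin.2.1.items]

-- ===== PORT B =====
-- s = max(max_in_chunk, 1) as a Nat
def pvChunkSize (m : Int) : Nat := if m ≤ 0 then 1 else m.toNat

-- the while-loop of B: take the extent of the next chunk (same prefix as the head key,
-- at most s keys), emit it, continue on the rest.  d[k] ported as getD (k is a key of dd).
def pvGoB (dd : PySem.Dict String Int) (n : Int) (s : Nat) : List String → List (List (String × Int))
  | [] => []
  | k :: ks =>
    let p := pvPrefix n k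
    let t := (ks.take (s - 1)).takeWhile (fun x => pvPrefix n x == p)
    ((k :: t).map (fun x => (x, dd.getD x 0))) :: pvGoB dd n s (ks.drop t.length)
termination_by ks => ks.length
decreasing_by simp only [List.length_drop, List.length_cons]; omega

def chunk_keys_alt (d : List (String × Int)) (by_first_n_char : Int) (max_in_chunk : Int) : List (List (String × Int)) :=
  let dd := PySem.Dict.ofList d
  pvGoB dd by_first_n_char (pvChunkSize max_in_chunk)
    (PySem.List.sorted dd.keys (fun k => k) false)

-- ===== PRECONDITION & SPEC =====
def Spec_chunk_keys (d : List (String × Int)) (by_first_n_char : Int) (max_in_chunk : Int) (out : List (List (String × Int))) : Prop := out = chunk_keys_alt d by_first_n_char max_in_chunk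
instance (d : List (String × Int)) (by_first_n_char : Int) (max_in_chunk : Int) (out : List (List (String × Int))) : Decidable (Spec_chunk_keys d by_first_n_char max_in_chunk out) := by unfold Spec_chunk_keys; infer_instance

-- ===== CLAIM (what is proved, stated in full; the proofs are below) =====
def Claim_equal_chunk_keys : Prop := ∀ (d : List (String × Int)) (by_first_n_char : Int) (max_in_chunk : Int), Dom_chunk_keys d by_first_n_char max_in_chunk → Spec_chunk_keys d by_first_n_char max_in_chunk (chunk_keys d by_first_n_char max_in_chunk)

-- ===== LEMMAS AND PROOFS =====

-- chunk-size bridge: for a nonempty current chunk, A's test  len < max_in_chunk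
-- is the same as  len < max(max_in_chunk, 1)
lemma pv_size_lt_iff (m : Int) (c : Nat) (hc : 1 ≤ c) : (c < pvChunkSize m) ↔ ((c : Int) < m) := by
  unfold pvChunkSize; split_ifs with h <;> omega

lemma pv_contains_eq_false {dd : PySem.Dict String Int} {k : String}
    (h : k ∉ dd.keys) : dd.contains k = false := by
  simp only [PySem.Dict.keys] at h
  simp only [PySem.Dict.contains, List.any_eq_false]
  intro p hp he; exact h (List.mem_map.mpr ⟨p, hp, by simpa using he⟩)

-- fresh insert appends
lemma pv_items_insert_fresh (dd : PySem.Dict String Int) (k : String) (v : Int)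
    (h : k ∉ dd.keys) : (dd.insert k v).items = dd.items ++ [(k, v)] := by
  rw [PySem.Dict.items_insert, pv_contains_eq_false h]; simp

lemma pv_keys_insert_fresh (dd : PySem.Dict String Int) (k : String) (v : Int)
    (h : k ∉ dd.keys) : (dd.insert k v).keys = dd.keys ++ [k] := by
  simp [PySem.Dict.keys, pv_items_insert_fresh dd k v h]

lemma pv_size_insert_fresh (dd : PySem.Dict String Int) (k : String) (v : Int)
    (h : k ∉ dd.keys) : (dd.insert k v).size = dd.size + 1 := by
  simp [PySem.Dict.size, pv_items_insert_fresh dd k v h]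

lemma pv_items_single (k : String) (v : Int) :
    (PySem.Dict.ofList [(k, v)] : PySem.Dict String Int).items = [(k, v)] := rfl

lemma pv_keys_single (k : String) (v : Int) :
    (PySem.Dict.ofList [(k, v)] : PySem.Dict String Int).keys = [k] := rfl

lemma pv_size_single (k : String) (v : Int) :
    (PySem.Dict.ofList [(k, v)] : PySem.Dict String Int).size = 1 := rfl

lemma pv_goB_cons (dd : PySem.Dict String Int) (n : Int) (s : Nat) (k : String) (ks : List String) :
    pvGoB dd n s (k :: ks) =
      ((k :: (ks.take (s - 1)).takeWhile (fun x => pvPrefix n x == pvPrefix n k)).map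
          (fun x => (x, dd.getD x 0))) ::
        pvGoB dd n s
          (ks.drop ((ks.take (s - 1)).takeWhile (fun x => pvPrefix n x == pvPrefix n k)).length) := by
  rw [pvGoB]

-- the invariant of A's loop: from an open chunk (cur, prefix p), the fold fills cur with the
-- longest run of same-prefix keys up to the size limit, then behaves like B's pvGoB.
lemma pv_loopA (dd : PySem.Dict String Int) (n m : Int) :
    ∀ (ks : List String) (chunks : List (List (String × Int))) (cur : PySem.Dict String Int) (p : String),
      cur.items ≠ [] →
      (∀ x ∈ ks, x ∉ cur.keys) → ks.Nodup →
      (let fin := ks.foldl (pvStepA dd n m) (chunks, cur, some p)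
       if fin.2.1.items = [] then fin.1 else fin.1 ++ [fin.2.1.items]) =
      chunks ++ ((cur.items ++
          ((ks.take (pvChunkSize m - cur.size)).takeWhile (fun x => pvPrefix n x == p)).map
            (fun x => (x, dd.getD x 0))) ::
        pvGoB dd n (pvChunkSize m)
          (ks.drop ((ks.take (pvChunkSize m - cur.size)).takeWhile (fun x => pvPrefix n x == p)).length)) := by
  intro ks
  induction ks with
  | nil =>
    intro chunks cur p hne _ _
    simp [hne, pvGoB]
  | cons k ks ih =>
    intro chunks cur p hne hfresh hnd
    have hc1 : 1 ≤ cur.size := by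
      have := List.length_pos_iff.mpr hne
      simpa [PySem.Dict.size] using this
    have hkc : k ∉ cur.keys := hfresh k (by simp)
    simp only [List.foldl_cons]
    by_cases hext : pvPrefix n k = p ∧ (cur.size : Int) < m
    · -- A extends the current chunk; B's takeWhile keeps k too
      have hstep : pvStepA dd n m (chunks, cur, some p) k =
          (chunks, cur.insert k (dd.getD k 0), some p) := by
        unfold pvStepA
        rw [if_neg]
        push Not
        refine ⟨by simp, by simp [hext.1], ?_⟩
        show ((cur.size : Int) < m)
        omega
      rw [hstep]
      have hlt : cur.size < pvChunkSize m := (pv_size_lt_iff m cur.size hc1).mpr hext.2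
      have ih' := ih chunks (cur.insert k (dd.getD k 0)) p
        (by simp [pv_items_insert_fresh _ _ _ hkc])
        (by
          intro x hx
          rw [pv_keys_insert_fresh _ _ _ hkc]
          simp only [List.mem_append, List.mem_singleton]
          rintro (h | rfl)
          · exact hfresh x (by simp [hx]) h
          · exact (List.nodup_cons.mp hnd).1 hx)
        (List.nodup_cons.mp hnd).2
      rw [ih']
      have htake : (k :: ks).take (pvChunkSize m - cur.size) =
          k :: ks.take (pvChunkSize m - (cur.insert k (dd.getD k 0)).size) := by
        rw [pv_size_insert_fresh _ _ _ hkc]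
        have : pvChunkSize m - cur.size = (pvChunkSize m - (cur.size + 1)) + 1 := by omega
        rw [this, List.take_succ_cons]
      rw [htake]
      rw [List.takeWhile_cons_of_pos (by simp [hext.1])]
      simp [pv_items_insert_fresh _ _ _ hkc]
    · -- A closes the current chunk and starts a new one; B's takeWhile is empty here
      have hstep : pvStepA dd n m (chunks, cur, some p) k =
          (chunks ++ [cur.items], PySem.Dict.ofList [(k, dd.getD k 0)], some (pvPrefix n k)) := by
        unfold pvStepA
        rw [if_pos, if_neg hne]
        rcases not_and_or.mp hext with h | h
        · exact Or.inr (Or.inl (by simp [h]))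
        · refine Or.inr (Or.inr ?_)
          show ((cur.size : Int) ≥ m)
          omega
      rw [hstep]
      have ih' := ih (chunks ++ [cur.items]) (PySem.Dict.ofList [(k, dd.getD k 0)]) (pvPrefix n k)
        (by rw [pv_items_single]; simp)
        (by
          intro x hx
          rw [pv_keys_single]
          simp only [List.mem_singleton]
          rintro rfl
          exact (List.nodup_cons.mp hnd).1 hx)
        (List.nodup_cons.mp hnd).2
      rw [ih']
      have ht0 : ((k :: ks).take (pvChunkSize m - cur.size)).takeWhile
          (fun x => pvPrefix n x == p) = [] := by
        rcases not_and_or.mp hext with h | h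
        · cases hsc : pvChunkSize m - cur.size with
          | zero => simp
          | succ j => rw [List.take_succ_cons, List.takeWhile_cons_of_neg (by simp [h])]
        · have : ¬ cur.size < pvChunkSize m := fun hlt =>
            h ((pv_size_lt_iff m cur.size hc1).mp hlt)
          have : pvChunkSize m - cur.size = 0 := by omega
          simp [this]
      rw [ht0]
      simp only [List.map_nil, List.append_nil, List.length_nil, List.drop_zero]
      rw [pv_goB_cons]
      simp [pv_items_single, pv_size_single]

theorem chunk_keys_eq_alt (d : List (String × Int)) (n m : Int) :
    chunk_keys d n m = chunk_keys_alt d n m := by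
  simp only [chunk_keys, chunk_keys_alt]
  have hnd : (PySem.List.sorted (PySem.Dict.ofList d).keys (fun k => k) false).Nodup :=
    (PySem.List.sorted_perm _ _ _).nodup_iff.mpr (PySem.Dict.nodup_keys_ofList d)
  cases hks : PySem.List.sorted (PySem.Dict.ofList d).keys (fun k => k) false with
  | nil => simp [pvGoB, PySem.Dict.empty]
  | cons k ks =>
    rw [hks] at hnd
    simp only [List.foldl_cons]
    have hstep : pvStepA (PySem.Dict.ofList d) n m ([], PySem.Dict.empty, none) k =
        ([], PySem.Dict.ofList [(k, (PySem.Dict.ofList d).getD k 0)], some (pvPrefix n k)) := by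
      unfold pvStepA
      rw [if_pos (Or.inl rfl)]
      rfl
    rw [hstep]
    have hmain := pv_loopA (PySem.Dict.ofList d) n m ks []
      (PySem.Dict.ofList [(k, (PySem.Dict.ofList d).getD k 0)]) (pvPrefix n k)
      (by rw [pv_items_single]; simp)
      (by
        intro x hx
        rw [pv_keys_single]
        simp only [List.mem_singleton]
        rintro rfl
        exact (List.nodup_cons.mp hnd).1 hx)
      (List.nodup_cons.mp hnd).2
    rw [hmain, pv_goB_cons]
    simp [pv_items_single, pv_size_single]

-- ===== VERDICT (by name: the statement is the Claim_ definition above) =====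
theorem chunk_keys_spec : Claim_equal_chunk_keys := by
  intro d n m _hdom
  unfold Spec_chunk_keys
  exact chunk_keys_eq_alt d n m
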